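-- pv_equiv track=rewrite | github.com/JavierBaeza/IA | ActividadClase/prueba.py | dfs_path_grid
-- ===== SOURCE A (Python) =====
-- def dfs_path_grid(grid, start, goal):
--     R, C = 10, 10
--     dirs = [(-1,0,'U'),(1,0,'D'),(0,-1,'L'),(0,1,'R')]
--     visited = set()
--     parent = {start: None}
--     parent_move = {start: None}
--
--     def dfs(u):
--         if u == goal:
--             return True
--         r, c = u
--         visited.add(u)
--         for dr, dc, mv in dirs:
--             nr, nc = r+dr, c+dc
--             v = (nr, nc)
--             if 0 <= nr < R and 0 <= nc < C and grid[nr][nc] == 0 and v not in visited: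
--                 parent[v] = u
--                 parent_move[v] = mv
--                 if dfs(v):
--                     return True
--         return False
--
--     found = dfs(start)
--     path, moves = [], ""
--     if found:
--         x = goal
--         seq = []
--         while x is not None:
--             path.append(x)
--             if parent_move[x] is not None:
--                 seq.append(parent_move[x])
--             x = parent[x]
--         path.reverse()
--         moves = "".join(reversed(seq))
--     return path, moves
-- ===== SOURCE B (Python) =====
-- def dfs_path_grid(grid, start, goal):
--     R, C = 10, 10
--     dirs = [(-1,0,'U'),(1,0,'D'),(0,-1,'L'),(0,1,'R')]
--     visited = set()
--     parent = {start: None}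
--     parent_move = {start: None}
--
--     # iterative DFS: explicit stack of (node, next-direction-index) frames
--     found = False
--     stack = [(start, 0)]
--     while stack:
--         u, k = stack[-1]
--         if k == 0:
--             if u == goal:
--                 found = True
--                 break
--             visited.add(u)
--             stack[-1] = (u, 1)
--         elif k <= 4:
--             stack[-1] = (u, k + 1)
--             dr, dc, mv = dirs[k - 1]
--             v = (u[0] + dr, u[1] + dc)
--             if 0 <= v[0] < R and 0 <= v[1] < C and grid[v[0]][v[1]] == 0 and v not in visited:
--                 parent[v] = u
--                 parent_move[v] = mv
--                 stack.append((v, 0))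
--         else:
--             stack.pop()
--
--     path, moves = [], ""
--     if found:
--         x = goal
--         while x is not None:
--             path = [x] + path
--             if parent_move[x] is not None:
--                 moves = parent_move[x] + moves
--             x = parent[x]
--     return path, moves
-- ===== Notes on version B (the rewrite author's own statement) =====
-- stated objective: alternative
-- what changed: A's recursive DFS is replaced by an iterative DFS driven by an explicit stack of (node, next-direction-index) frames simulating the call stack, and the path/moves are rebuilt front-to-back by prepending along the parent chain instead of append-then-reverse.
import Mathlib
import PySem

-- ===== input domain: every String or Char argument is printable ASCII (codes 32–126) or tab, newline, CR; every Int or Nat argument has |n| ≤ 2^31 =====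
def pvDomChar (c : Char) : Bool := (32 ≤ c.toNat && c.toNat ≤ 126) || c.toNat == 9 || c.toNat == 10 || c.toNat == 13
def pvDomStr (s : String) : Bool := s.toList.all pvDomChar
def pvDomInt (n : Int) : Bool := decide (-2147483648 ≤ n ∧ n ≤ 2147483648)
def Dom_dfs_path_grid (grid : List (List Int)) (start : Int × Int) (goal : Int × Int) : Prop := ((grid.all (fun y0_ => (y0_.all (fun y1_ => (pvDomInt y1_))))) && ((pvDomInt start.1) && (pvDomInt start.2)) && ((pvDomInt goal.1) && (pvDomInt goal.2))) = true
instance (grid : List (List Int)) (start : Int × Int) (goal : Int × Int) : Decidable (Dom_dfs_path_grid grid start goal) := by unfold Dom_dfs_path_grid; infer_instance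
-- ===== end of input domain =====

-- B replaces A's recursive DFS by an iterative DFS over an explicit stack of (node, next-direction)
-- frames and rebuilds path/moves front-to-back by prepending (objective: alternative decomposition).
-- Both sides use fuel only as a totality guard (one unit per DFS call / stack push; 200 > the 101
-- calls a 10×10 grid can cause, so the guard is never reached on any input).

-- shared small helpers (the direction table, the grid test, the DFS state record)
def pvDirs : List (Int × Int × String) := [(-1, 0, "U"), (1, 0, "D"), (0, -1, "L"), (0, 1, "R")]

-- grid[r][c]; exact for the in-bounds accesses Pre_ admits (out of range Python raises IndexError,
-- which Pre_ excludes; the default 1 is never compared there)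
def pvGridAt (grid : List (List Int)) (r c : Int) : Int :=
  ((PySem.List.pyGet? grid r).bind (fun row => PySem.List.pyGet? row c)).getD 1

structure DfsSt where
  visited : PySem.Set (Int × Int)
  parent  : PySem.Dict (Int × Int) (Option (Int × Int))
  pmove   : PySem.Dict (Int × Int) (Option String)
  deriving DecidableEq, Repr

-- the eligibility test '0 <= nr < 10 and 0 <= nc < 10 and grid[nr][nc] == 0 and v not in visited'
def pvOk (grid : List (List Int)) (s : DfsSt) (v : Int × Int) : Bool :=
  decide (0 ≤ v.1) && decide (v.1 < 10) && decide (0 ≤ v.2) && decide (v.2 < 10) &&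
    (pvGridAt grid v.1 v.2 == 0) && !(PySem.Set.contains s.visited v)

def pvSetPar (s : DfsSt) (v u : Int × Int) (mv : String) : DfsSt :=
  { s with parent := s.parent.insert v (some u), pmove := s.pmove.insert v (some mv) }

-- ===== PORT A =====
-- A's recursive dfs(u).  pvBodyA F f u s: F is a structural recursion bound (strictly above the
-- fuel, never reached at the values the port uses), f is the fuel, spent one unit per recursive
-- call; the third component of the result is the number of recursive calls made.  pvTryT is the
-- for-loop over the remaining directions, taking the recursive call as a function argument.
def pvTryT (grid : List (List Int)) (goal : Int × Int)
    (rc : Nat → (Int × Int) → DfsSt → Bool × DfsSt × Nat) :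
    List (Int × Int × String) → Nat → (Int × Int) → DfsSt → Bool × DfsSt × Nat
  | [], _, _, s => (false, s, 0)
  | d :: ds, f, u, s =>
    let v : Int × Int := (u.1 + d.1, u.2 + d.2.1)
    if pvOk grid s v then
      let s' := pvSetPar s v u d.2.2
      if f = 0 then pvTryT grid goal rc ds 0 u s'     -- fuel guard only; unreachable at fuel 200
      else
        let r := rc (f - 1) v s'
        if r.1 then (true, r.2.1, r.2.2 + 1)
        else
          let r2 := pvTryT grid goal rc ds (f - 1 - r.2.2) u r.2.1
          (r2.1, r2.2.1, 1 + r.2.2 + r2.2.2)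
    else pvTryT grid goal rc ds f u s

def pvBodyA (grid : List (List Int)) (goal : Int × Int) :
    Nat → Nat → (Int × Int) → DfsSt → Bool × DfsSt × Nat
  | 0, _, _, s => (false, s, 0)                       -- bound guard; the port keeps F > f
  | F + 1, f, u, s =>
    if u = goal then (true, s, 0)
    else pvTryT grid goal (fun g v s => pvBodyA grid goal F g v s) pvDirs f u
      { s with visited := PySem.Set.add s.visited u }

-- reconstruction: A appends to path/seq walking the parent chain, then reverses both
def pvReconA (f : Nat) (x : Option (Int × Int)) (s : DfsSt)
    (path : List (Int × Int)) (seq : List String) : List (Int × Int) × List String :=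
  match f, x with
  | 0, _ => (path, seq)
  | _ + 1, none => (path, seq)
  | f' + 1, some y =>
    let seq' := match s.pmove.getD y none with
      | some mv => seq ++ [mv]
      | none => seq
    pvReconA f' (s.parent.getD y none) s (path ++ [y]) seq'

def dfs_path_grid (grid : List (List Int)) (start : Int × Int) (goal : Int × Int) :
    (List (Int × Int)) × String :=
  let s0 : DfsSt := ⟨PySem.Set.empty, PySem.Dict.empty.insert start none,
                     PySem.Dict.empty.insert start none⟩
  let r := pvBodyA grid goal 201 200 start s0
  if r.1 then
    let pm := pvReconA 200 (some goal) r.2.1 [] []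
    (pm.1.reverse, pm.2.reverse.foldl (· ++ ·) "")
  else ([], "")

-- ===== PORT B =====
-- B's explicit stack of (node, next-direction-index) frames.  pvInner walks the stack one step at
-- a time (its Nat argument is a structural step budget, always called strictly above the stack's
-- remaining step cost, so the 0 guard is never reached); a push hands the grown stack to push?,
-- which restarts the walk with one unit of push fuel spent (none = push fuel exhausted, skip the
-- push; unreachable at fuel 200).
def pvCost (k : Nat) : Nat := if 5 ≤ k then 1 else 6 - k
def pvCostStack (st : List ((Int × Int) × Nat)) : Nat := (st.map (fun p => pvCost p.2)).sum

def pvInner (grid : List (List Int)) (goal : Int × Int)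
    (push? : Option (List ((Int × Int) × Nat) → DfsSt → Bool × DfsSt)) :
    Nat → List ((Int × Int) × Nat) → DfsSt → Bool × DfsSt
  | 0, _, s => (false, s)
  | _ + 1, [], s => (false, s)
  | c + 1, (u, k) :: rest, s =>
    if k = 0 then
      if u = goal then (true, s)
      else pvInner grid goal push? c ((u, 1) :: rest)
        { s with visited := PySem.Set.add s.visited u }
    else if k ≤ 4 then
      if pvOk grid s (u.1 + (pvDirs.getD (k - 1) (0, 0, "")).1,
          u.2 + (pvDirs.getD (k - 1) (0, 0, "")).2.1) then
        match push? with
        | some push =>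
          push (((u.1 + (pvDirs.getD (k - 1) (0, 0, "")).1,
                  u.2 + (pvDirs.getD (k - 1) (0, 0, "")).2.1), 0) :: (u, k + 1) :: rest)
            (pvSetPar s (u.1 + (pvDirs.getD (k - 1) (0, 0, "")).1,
              u.2 + (pvDirs.getD (k - 1) (0, 0, "")).2.1) u (pvDirs.getD (k - 1) (0, 0, "")).2.2)
        | none =>
          pvInner grid goal none c ((u, k + 1) :: rest)
            (pvSetPar s (u.1 + (pvDirs.getD (k - 1) (0, 0, "")).1,
              u.2 + (pvDirs.getD (k - 1) (0, 0, "")).2.1) u (pvDirs.getD (k - 1) (0, 0, "")).2.2)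
      else pvInner grid goal push? c ((u, k + 1) :: rest) s
    else pvInner grid goal push? c rest s

def pvRunB (grid : List (List Int)) (goal : Int × Int) :
    Nat → List ((Int × Int) × Nat) → DfsSt → Bool × DfsSt
  | 0, st, s => pvInner grid goal none (pvCostStack st + 1) st s
  | f + 1, st, s =>
    pvInner grid goal (some (fun st' s' => pvRunB grid goal f st' s')) (pvCostStack st + 1) st s

-- reconstruction: B prepends, building path and moves front-to-back (no reverse)
def pvReconB (f : Nat) (x : Option (Int × Int)) (s : DfsSt)
    (path : List (Int × Int)) (moves : String) : List (Int × Int) × String :=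
  match f, x with
  | 0, _ => (path, moves)
  | _ + 1, none => (path, moves)
  | f' + 1, some y =>
    let moves' := match s.pmove.getD y none with
      | some mv => mv ++ moves
      | none => moves
    pvReconB f' (s.parent.getD y none) s (y :: path) moves'

def dfs_path_grid_alt (grid : List (List Int)) (start : Int × Int) (goal : Int × Int) :
    (List (Int × Int)) × String :=
  let s0 : DfsSt := ⟨PySem.Set.empty, PySem.Dict.empty.insert start none,
                     PySem.Dict.empty.insert start none⟩
  let r := pvRunB grid goal 200 [(start, 0)] s0
  if r.1 then pvReconB 200 (some goal) r.2 [] "" else ([], "")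

-- ===== PRECONDITION & SPEC =====
def pvInb (r c : Int) : Bool := decide (0 ≤ r) && decide (r < 10) && decide (0 ≤ c) && decide (c < 10)

-- Pre_ excludes grids smaller than the hard-coded 10×10 search area (unless start == goal or start
-- has no in-bounds neighbour), where A's fixed-bounds DFS indexes past the grid and generally
-- raises IndexError; on a few such inputs the search reaches the goal before any out-of-range
-- access and both programs agree there anyway.
def Pre_dfs_path_grid (grid : List (List Int)) (start : Int × Int) (goal : Int × Int) : Prop :=
  start = goal ∨
  (10 ≤ grid.length ∧ ∀ row ∈ grid.take 10, 10 ≤ row.length) ∨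
  (pvInb (start.1 - 1) start.2 = false ∧ pvInb (start.1 + 1) start.2 = false ∧
   pvInb start.1 (start.2 - 1) = false ∧ pvInb start.1 (start.2 + 1) = false)
instance (grid : List (List Int)) (start : Int × Int) (goal : Int × Int) : Decidable (Pre_dfs_path_grid grid start goal) := by unfold Pre_dfs_path_grid; infer_instance

def pvWitness_dfs_path_grid : List (List Int) × (Int × Int) × (Int × Int) := ([], (0, 0), (0, 0))

def Spec_dfs_path_grid (grid : List (List Int)) (start : Int × Int) (goal : Int × Int) (out : (List (Int × Int)) × String) : Prop := out = dfs_path_grid_alt grid start goal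
instance (grid : List (List Int)) (start : Int × Int) (goal : Int × Int) (out : (List (Int × Int)) × String) : Decidable (Spec_dfs_path_grid grid start goal out) := by unfold Spec_dfs_path_grid; infer_instance

-- ===== CLAIM (what is proved, stated in full; the proofs are below) =====
def Claim_equal_dfs_path_grid : Prop := ∀ (grid : List (List Int)) (start : Int × Int) (goal : Int × Int), Dom_dfs_path_grid grid start goal → Pre_dfs_path_grid grid start goal → Spec_dfs_path_grid grid start goal (dfs_path_grid grid start goal)

-- ===== LEMMAS AND PROOFS =====

-- the machine's push handler at a given amount of push fuel
def pvPushOf (grid : List (List Int)) (goal : Int × Int) :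
    Nat → Option (List ((Int × Int) × Nat) → DfsSt → Bool × DfsSt)
  | 0 => none
  | f + 1 => some (fun st s => pvRunB grid goal f st s)

theorem pv_runB_eq_inner (grid : List (List Int)) (goal : Int × Int) (f : Nat)
    (st : List ((Int × Int) × Nat)) (s : DfsSt) :
    pvRunB grid goal f st s = pvInner grid goal (pvPushOf grid goal f) (pvCostStack st + 1) st s := by
  cases f <;> rfl

theorem pv_costStack_cons (u : Int × Int) (k : Nat) (rest : List ((Int × Int) × Nat)) :
    pvCostStack ((u, k) :: rest) = pvCost k + pvCostStack rest := by
  simp [pvCostStack]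

-- the step budget of pvInner is irrelevant as long as it exceeds the stack's remaining cost
theorem pv_cost_pos (k : Nat) : 1 ≤ pvCost k := by
  unfold pvCost; split_ifs <;> omega

theorem pv_cost_succ_lt (k : Nat) (h : k ≤ 4) : pvCost (k + 1) < pvCost k := by
  unfold pvCost; split_ifs <;> omega

theorem pv_inner_irrel (grid : List (List Int)) (goal : Int × Int)
    (push? : Option (List ((Int × Int) × Nat) → DfsSt → Bool × DfsSt)) (c1 c2 : Nat)
    (st : List ((Int × Int) × Nat)) (s : DfsSt) (h1 : pvCostStack st < c1)
    (h2 : pvCostStack st < c2) :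
    pvInner grid goal push? c1 st s = pvInner grid goal push? c2 st s := by
  induction c1 generalizing c2 st s with
  | zero => omega
  | succ c1 ih =>
    cases c2 with
    | zero => omega
    | succ c2 =>
      cases st with
      | nil => rfl
      | cons top rest =>
        obtain ⟨u, k⟩ := top
        show (if k = 0 then _ else _) = (if k = 0 then _ else _)
        rw [pv_costStack_cons] at h1 h2
        by_cases h0 : k = 0
        · subst h0
          rw [if_pos rfl]
          by_cases hg : u = goal
          · simp [hg]
          · rw [if_neg hg, if_neg hg]
            have h5 : pvCost 1 < pvCost 0 := by simp [pvCost]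
            apply ih <;> · (try simp only [pv_costStack_cons]); omega
        · rw [if_neg h0, if_neg h0]
          by_cases h4 : k ≤ 4
          · rw [if_pos h4, if_pos h4]
            have h5 : pvCost (k + 1) < pvCost k := pv_cost_succ_lt k h4
            by_cases hok : pvOk grid s (u.1 + (pvDirs.getD (k - 1) (0, 0, "")).1,
                u.2 + (pvDirs.getD (k - 1) (0, 0, "")).2.1) = true
            · rw [if_pos hok, if_pos hok]
              cases push? with
              | some push => rfl
              | none => apply ih <;> · (try simp only [pv_costStack_cons]); omega
            · rw [if_neg hok, if_neg hok]
              apply ih <;> · (try simp only [pv_costStack_cons]); omega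
          · rw [if_neg h4, if_neg h4]
            have h5 : 1 ≤ pvCost k := pv_cost_pos k
            apply ih <;> omega

-- one step of the machine, written in the shape of the while-loop's dispatch
theorem pv_runB_cons (grid : List (List Int)) (goal : Int × Int) (f : Nat) (u : Int × Int)
    (k : Nat) (rest : List ((Int × Int) × Nat)) (s : DfsSt) :
    pvRunB grid goal f ((u, k) :: rest) s =
      if k = 0 then
        if u = goal then (true, s)
        else pvRunB grid goal f ((u, 1) :: rest) { s with visited := PySem.Set.add s.visited u }
      else if k ≤ 4 then
        if pvOk grid s (u.1 + (pvDirs.getD (k - 1) (0, 0, "")).1,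
            u.2 + (pvDirs.getD (k - 1) (0, 0, "")).2.1) then
          if f = 0 then
            pvRunB grid goal 0 ((u, k + 1) :: rest)
              (pvSetPar s (u.1 + (pvDirs.getD (k - 1) (0, 0, "")).1,
                u.2 + (pvDirs.getD (k - 1) (0, 0, "")).2.1) u (pvDirs.getD (k - 1) (0, 0, "")).2.2)
          else
            pvRunB grid goal (f - 1)
              (((u.1 + (pvDirs.getD (k - 1) (0, 0, "")).1,
                 u.2 + (pvDirs.getD (k - 1) (0, 0, "")).2.1), 0) :: (u, k + 1) :: rest)
              (pvSetPar s (u.1 + (pvDirs.getD (k - 1) (0, 0, "")).1,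
                u.2 + (pvDirs.getD (k - 1) (0, 0, "")).2.1) u (pvDirs.getD (k - 1) (0, 0, "")).2.2)
        else pvRunB grid goal f ((u, k + 1) :: rest) s
      else pvRunB grid goal f rest s := by
  rw [pv_runB_eq_inner]
  show (if k = 0 then _ else _) = _
  by_cases h0 : k = 0
  · subst h0
    rw [if_pos rfl]
    by_cases hg : u = goal
    · simp [hg]
    · rw [if_neg hg, if_neg hg, pv_runB_eq_inner]
      have h5 : pvCost 1 < pvCost 0 := by simp [pvCost]
      apply pv_inner_irrel <;> · (try simp only [pv_costStack_cons]); omega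
  · rw [if_neg h0, if_neg h0]
    by_cases h4 : k ≤ 4
    · rw [if_pos h4, if_pos h4]
      have h5 : pvCost (k + 1) < pvCost k := pv_cost_succ_lt k h4
      by_cases hok : pvOk grid s (u.1 + (pvDirs.getD (k - 1) (0, 0, "")).1,
          u.2 + (pvDirs.getD (k - 1) (0, 0, "")).2.1) = true
      · rw [if_pos hok, if_pos hok]
        cases f with
        | zero =>
          rw [if_pos rfl]
          show pvInner grid goal none _ _ _ = _
          rw [pv_runB_eq_inner]
          show _ = pvInner grid goal none _ _ _
          apply pv_inner_irrel <;> · (try simp only [pv_costStack_cons]); omega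
        | succ f =>
          rw [if_neg (by omega : ¬ f + 1 = 0)]
          rfl
      · rw [if_neg hok, if_neg hok, pv_runB_eq_inner]
        apply pv_inner_irrel <;> · (try simp only [pv_costStack_cons]); omega
    · rw [if_neg h4, if_neg h4, pv_runB_eq_inner]
      have h5 : 1 ≤ pvCost k := pv_cost_pos k
      apply pv_inner_irrel <;> · (try simp only [pv_costStack_cons]); omega

-- the stack machine simulates the recursion: a frame (u, 0) behaves like the call pvBodyA, and a
-- frame (u, j+1) like pvTryT on the remaining directions pvDirs.drop j, with matching fuel use
mutual
theorem pv_sim_try (grid : List (List Int)) (goal : Int × Int) (F f : Nat) (j : Nat)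
    (hj : j ≤ 4) (hf : f ≤ F) (u : Int × Int) (s : DfsSt) (rest : List ((Int × Int) × Nat)) :
    pvRunB grid goal f ((u, j + 1) :: rest) s =
      (if (pvTryT grid goal (fun g v s => pvBodyA grid goal F g v s) (pvDirs.drop j) f u s).1 then
        (true, (pvTryT grid goal (fun g v s => pvBodyA grid goal F g v s) (pvDirs.drop j) f u s).2.1)
       else
        pvRunB grid goal
          (f - (pvTryT grid goal (fun g v s => pvBodyA grid goal F g v s) (pvDirs.drop j) f u s).2.2)
          rest
          (pvTryT grid goal (fun g v s => pvBodyA grid goal F g v s) (pvDirs.drop j) f u s).2.1) := by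
  by_cases hj4 : j = 4
  · subst hj4
    rw [pv_runB_cons]
    have hdrop : pvDirs.drop 4 = [] := by simp [pvDirs]
    rw [hdrop, pvTryT]
    norm_num
  · have hjlt : j < 4 := by omega
    have hlen : j < pvDirs.length := by simp [pvDirs]; omega
    have hdrop : pvDirs.drop j = pvDirs[j] :: pvDirs.drop (j + 1) :=
      List.drop_eq_getElem_cons hlen
    have hd : pvDirs.getD (j + 1 - 1) (0, 0, "") = pvDirs[j] := by
      rw [Nat.add_sub_cancel]; exact List.getD_eq_getElem pvDirs (0, 0, "") hlen
    rw [pv_runB_cons, if_neg (by omega : ¬ (j + 1 = 0)), if_pos (by omega : j + 1 ≤ 4), hd, hdrop,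
      pvTryT]
    by_cases hok : pvOk grid s (u.1 + pvDirs[j].1, u.2 + pvDirs[j].2.1) = true
    · rw [if_pos hok, if_pos hok]
      by_cases hfz : f = 0
      case pos =>
        subst hfz
        rw [if_pos rfl, if_pos rfl]
        have h := pv_sim_try grid goal F 0 (j + 1) (by omega) (by omega) u
          (pvSetPar s (u.1 + pvDirs[j].1, u.2 + pvDirs[j].2.1) u pvDirs[j].2.2) rest
        simpa using h
      case neg =>
        rw [if_neg hfz, if_neg hfz]
        rw [pv_sim_body grid goal F (f - 1) (u.1 + pvDirs[j].1, u.2 + pvDirs[j].2.1)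
          (pvSetPar s (u.1 + pvDirs[j].1, u.2 + pvDirs[j].2.1) u pvDirs[j].2.2)
          ((u, j + 1 + 1) :: rest) (by omega)]
        by_cases hb : (pvBodyA grid goal F (f - 1)
            (u.1 + pvDirs[j].1, u.2 + pvDirs[j].2.1)
            (pvSetPar s (u.1 + pvDirs[j].1, u.2 + pvDirs[j].2.1) u pvDirs[j].2.2)).1 = true
        · simp [hb]
        · rw [if_neg hb]
          rw [pv_sim_try grid goal F _ (j + 1) (by omega) (by omega) u _ rest]
          simp only [hb, Bool.false_eq_true, if_false]
          by_cases hr2 : (pvTryT grid goal (fun g v s => pvBodyA grid goal F g v s)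
              (pvDirs.drop (j + 1))
              ((f - 1 - (pvBodyA grid goal F (f - 1) (u.1 + pvDirs[j].1, u.2 + pvDirs[j].2.1)
                (pvSetPar s (u.1 + pvDirs[j].1, u.2 + pvDirs[j].2.1) u pvDirs[j].2.2)).2.2)) u
              (pvBodyA grid goal F (f - 1) (u.1 + pvDirs[j].1, u.2 + pvDirs[j].2.1)
                (pvSetPar s (u.1 + pvDirs[j].1, u.2 + pvDirs[j].2.1) u pvDirs[j].2.2)).2.1).1 = true
          · simp [hr2]
          · simp only [hr2, Bool.false_eq_true, if_false]
            congr 1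
            omega
    · rw [if_neg hok, if_neg hok]
      have h := pv_sim_try grid goal F f (j + 1) (by omega) hf u s rest
      simpa using h
  termination_by (F, f, 5 - j)
  decreasing_by all_goals (simp_wf; simp only [Prod.lex_def]; simp; omega)

theorem pv_sim_body (grid : List (List Int)) (goal : Int × Int) (F f : Nat)
    (v : Int × Int) (s : DfsSt) (rest : List ((Int × Int) × Nat)) (hf : f < F) :
    pvRunB grid goal f ((v, 0) :: rest) s =
      (if (pvBodyA grid goal F f v s).1 then (true, (pvBodyA grid goal F f v s).2.1)
       else pvRunB grid goal (f - (pvBodyA grid goal F f v s).2.2) rest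
         (pvBodyA grid goal F f v s).2.1) := by
  cases F with
  | zero => omega
  | succ F =>
    rw [pv_runB_cons, pvBodyA]
    by_cases hg : v = goal
    · simp [hg]
    · rw [if_pos rfl, if_neg hg, if_neg hg]
      have h := pv_sim_try grid goal F f 0 (by omega) (by omega) v
        { s with visited := PySem.Set.add s.visited v } rest
      simpa using h
  termination_by (F, f, 6)
  decreasing_by all_goals (simp_wf; simp only [Prod.lex_def]; simp; omega)
end

-- walking the same parent chain, B's prepend-accumulators stay the reverses of A's append-accumulators
-- folding string concatenation from an arbitrary seed (relates A's reversed join to B's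
-- front-extension of the moves string)
theorem pv_strFoldl (l : List String) (a : String) :
    l.foldl (· ++ ·) a = a ++ l.foldl (· ++ ·) "" := by
  induction l generalizing a with
  | nil => simp [String.append_empty]
  | cons b t ih =>
    rw [List.foldl_cons, List.foldl_cons, ih (a ++ b), ih ("" ++ b)]
    simp [String.empty_append, String.append_assoc]

-- walking the same parent chain, B's prepend-accumulators stay the reverses of A's
-- append-accumulators
theorem pv_recon_sim (s : DfsSt) (f : Nat) (x : Option (Int × Int))
    (pA : List (Int × Int)) (qA : List String) :
    pvReconB f x s pA.reverse (qA.reverse.foldl (· ++ ·) "") =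
      ((pvReconA f x s pA qA).1.reverse, (pvReconA f x s pA qA).2.reverse.foldl (· ++ ·) "") := by
  induction f generalizing x pA qA with
  | zero => rw [pvReconA, pvReconB]
  | succ f ih =>
    cases x with
    | none => rw [pvReconA, pvReconB]
    | some y =>
      rw [pvReconA, pvReconB]
      cases hmv : s.pmove.getD y none with
      | none =>
        have ih' := ih (s.parent.getD y none) (pA ++ [y]) qA
        simp only [List.reverse_append, List.reverse_singleton, List.singleton_append] at ih'
        exact ih'
      | some mv =>
        have ih' := ih (s.parent.getD y none) (pA ++ [y]) (qA ++ [mv])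
        simp only [List.reverse_append, List.reverse_singleton, List.singleton_append,
          List.foldl_cons] at ih'
        rw [pv_strFoldl qA.reverse ("" ++ mv), String.empty_append] at ih'
        exact ih'

-- ===== VERDICT (by name: the statement is the Claim_ definition above) =====
theorem dfs_path_grid_spec : Claim_equal_dfs_path_grid := by
  unfold Claim_equal_dfs_path_grid
  intro grid start goal _ _
  unfold Spec_dfs_path_grid dfs_path_grid dfs_path_grid_alt
  simp only
  rw [pv_sim_body grid goal 201 200 start
    ⟨PySem.Set.empty, PySem.Dict.empty.insert start none, PySem.Dict.empty.insert start none⟩ [] (by omega)]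
  by_cases hr : (pvBodyA grid goal 201 200 start
      ⟨PySem.Set.empty, PySem.Dict.empty.insert start none,
        PySem.Dict.empty.insert start none⟩).1 = true
  · simp only [hr, if_true]
    have h := pv_recon_sim (pvBodyA grid goal 201 200 start
      ⟨PySem.Set.empty, PySem.Dict.empty.insert start none,
        PySem.Dict.empty.insert start none⟩).2.1 200 (some goal) [] []
    simpa using h.symm
  · simp only [hr, Bool.false_eq_true, if_false]
    rw [pv_runB_eq_inner, pvInner]
    simp
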